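-- pv_equiv track=rewrite | github.com/pinkysworld/CKU-Sim | cku_sim/analysis/file_level_case_control.py | normalise_github_slug
-- ===== SOURCE A (Python) =====
-- def normalise_github_slug(git_url: str) -> str | None:
--     """Extract an owner/repo slug from a GitHub remote URL."""
--     url = git_url.strip()
--     for prefix in ("https://github.com/", "http://github.com/", "git@github.com:"):
--         if url.startswith(prefix):
--             slug = url[len(prefix):]
--             if slug.endswith(".git"):
--                 slug = slug[:-4]
--             return slug.strip("/")
--     return None
-- ===== SOURCE B (Python) =====
-- def normalise_github_slug(git_url: str) -> str | None:
--     """Extract an owner/repo slug from a GitHub remote URL.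
--
--     Instead of looping over three full prefixes, locate the single first
--     occurrence of "github.com" with str.partition and validate what
--     surrounds it (scheme on the left, separator on the right)."""
--     url = git_url.strip()
--     head, found, tail = url.partition("github.com")
--     if not found:
--         return None
--     if head in ("https://", "http://") and tail.startswith("/"):
--         slug = tail[1:]
--     elif head == "git@" and tail.startswith(":"):
--         slug = tail[1:]
--     else:
--         return None
--     if slug.endswith(".git"):
--         slug = slug[:-4]
--     return slug.strip("/")
-- ===== Notes on version B (the rewrite author's own statement) =====
-- stated objective: alternative
-- what changed: Replaces the loop testing three full URL prefixes by a single str.partition of the URL at the first occurrence of the host name, then validates the surrounding scheme (left part) and separator (first char of the right part).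
import Mathlib
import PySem

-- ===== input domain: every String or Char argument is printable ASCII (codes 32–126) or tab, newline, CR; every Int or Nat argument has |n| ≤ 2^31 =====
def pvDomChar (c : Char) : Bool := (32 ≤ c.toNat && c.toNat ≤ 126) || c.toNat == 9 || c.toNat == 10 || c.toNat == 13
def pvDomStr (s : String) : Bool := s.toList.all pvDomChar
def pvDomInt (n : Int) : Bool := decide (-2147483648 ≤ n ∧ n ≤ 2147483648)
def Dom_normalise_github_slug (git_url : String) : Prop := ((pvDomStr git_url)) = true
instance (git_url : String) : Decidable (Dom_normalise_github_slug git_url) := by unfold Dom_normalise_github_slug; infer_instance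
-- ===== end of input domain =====

-- B replaces A's loop over three full prefixes by one substring search (str.partition on
-- "github.com") followed by validation of the surrounding scheme/separator (objective: idiomatic).

-- ===== PORT A =====
-- the 'for prefix in (...)' loop, recursion over the tuple of prefixes
def pvLoopA (url : String) : List String → Option String
  | [] => none
  | p :: ps =>
    if PySem.Str.startswith url p then
      let slug := PySem.Str.slice url (some (PySem.Str.len p)) none
      let slug := if PySem.Str.endswith slug ".git" then PySem.Str.slice slug none (some (-4)) else slug
      some (PySem.Str.stripChars slug "/")
    else pvLoopA url ps

def normalise_github_slug (git_url : String) : Option String :=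
  let url := PySem.Str.strip git_url
  pvLoopA url ["https://github.com/", "http://github.com/", "git@github.com:"]

-- ===== PORT B =====
-- helpers for the port of Source B (same steps, factored: classify what surrounds the match,
-- then the shared '.git'/'/' tail handling)
def pvSlugTail (u : String) (i : Int) : Option String :=
  let head := PySem.Str.slice u none (some i)
  let tail := PySem.Str.slice u (some (i + 10)) none
  if (head = "https://" ∨ head = "http://") ∧ PySem.Str.startswith tail "/" = true then
    some (PySem.Str.slice tail (some 1) none)
  else if head = "git@" ∧ PySem.Str.startswith tail ":" = true then
    some (PySem.Str.slice tail (some 1) none)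
  else none

def pvFinish (slug : String) : String :=
  PySem.Str.stripChars (if PySem.Str.endswith slug ".git" then PySem.Str.slice slug none (some (-4)) else slug) "/"

def pvPartB (u : String) (i : Int) : Option String :=
  if i = -1 then none
  else
    match pvSlugTail u i with
    | none => none
    | some slug => some (pvFinish slug)

def normalise_github_slug_alt (git_url : String) : Option String :=
  let url := PySem.Str.strip git_url
  -- url.partition("github.com") ported by hand, exact: partition splits at the FIRST
  -- occurrence, i.e. at str.find ('found' ↔ find ≠ -1; len("github.com") = 10)
  pvPartB url (PySem.Str.find url "github.com")

-- ===== PRECONDITION & SPEC =====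
def Spec_normalise_github_slug (git_url : String) (out : Option String) : Prop := out = normalise_github_slug_alt git_url
instance (git_url : String) (out : Option String) : Decidable (Spec_normalise_github_slug git_url out) := by unfold Spec_normalise_github_slug; infer_instance

-- ===== CLAIM (what is proved, stated in full; the proofs are below) =====
def Claim_equal_normalise_github_slug : Prop := ∀ (git_url : String), Dom_normalise_github_slug git_url → Spec_normalise_github_slug git_url (normalise_github_slug git_url)


-- ===== LEMMAS AND PROOFS =====

-- first-occurrence characterisation: if sub occurs at offset o of p (and nowhere earlier
-- inside p), then find locates it at o in p ++ r, whatever r is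
theorem pv_find_at (sub p r : List Char) (o : Nat)
    (hlen : o + sub.length ≤ p.length)
    (hocc : (p.drop o).take sub.length = sub)
    (hmin : ∀ j, j < o → (p.drop j).take sub.length ≠ sub) :
    PySem.Chars.find (p ++ r) sub = (o : Int) := by
  have hdrop : ∀ j : Nat, j ≤ p.length → (p ++ r).drop j = p.drop j ++ r :=
    fun j hj => List.drop_append_of_le_length hj
  have hpre : sub <+: (p ++ r).drop o := by
    rw [hdrop o (by omega)]
    exact (hocc ▸ List.take_prefix sub.length (p.drop o)).trans (List.prefix_append _ _)
  have hnot : ∀ j, j < o → ¬ sub <+: (p ++ r).drop j := by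
    intro j hj hcon
    rw [hdrop j (by omega)] at hcon
    have hle : sub.length ≤ (p.drop j).length := by
      simp only [List.length_drop]; omega
    have h := List.prefix_iff_eq_take.mp hcon
    rw [List.take_append_of_le_length hle] at h
    exact hmin j hj h.symm
  have hinfix : sub <:+: (p ++ r) :=
    hpre.isInfix.trans (List.drop_suffix o (p ++ r)).isInfix
  have h0 : 0 ≤ PySem.Chars.find (p ++ r) sub := (PySem.Chars.find_nonneg_iff _ _).mpr hinfix
  obtain ⟨hfp, hfmin⟩ := PySem.Chars.find_spec h0
  have ht : (PySem.Chars.find (p ++ r) sub).toNat = o := by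
    rcases lt_trichotomy (PySem.Chars.find (p ++ r) sub).toNat o with h | h | h
    · exact absurd hfp (hnot _ h)
    · exact h
    · exact absurd hpre (hfmin o h)
  omega

-- if l carries hd at the front, sub right after it and sep right after that, then
-- hd ++ sub ++ sep is a prefix of l
theorem pv_recompose (l hd sub sep p : List Char) (o : Nat)
    (hhd : l.take o = hd) (hsub : sub <+: l.drop o)
    (hsep : sep <+: l.drop (o + sub.length))
    (hp : hd ++ (sub ++ sep) = p) : p <+: l := by
  obtain ⟨t, ht⟩ := hsub
  have htt : t = l.drop (o + sub.length) := by
    have h := congrArg (List.drop sub.length) ht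
    rw [List.drop_left, List.drop_drop] at h
    rw [h, Nat.add_comm]
  obtain ⟨rest, hrest⟩ := hsep
  refine ⟨rest, ?_⟩
  calc p ++ rest = l.take o ++ (sub ++ (sep ++ rest)) := by rw [← hp, ← hhd]; simp [List.append_assoc]
    _ = l.take o ++ l.drop o := by rw [hrest, ← htt, ht]
    _ = l := List.take_append_drop o l

-- evaluation lemmas for pvPartB, driven by the value of pvSlugTail
theorem pvPartB_neg_one (u : String) : pvPartB u (-1) = none := by
  unfold pvPartB; exact if_pos rfl

theorem pvPartB_some (u : String) (i : Int) (slug : String) (hne : ¬ i = -1)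
    (hs : pvSlugTail u i = some slug) : pvPartB u i = some (pvFinish slug) := by
  unfold pvPartB; rw [if_neg hne, hs]

theorem pvPartB_none (u : String) (i : Int) (hne : ¬ i = -1)
    (hs : pvSlugTail u i = none) : pvPartB u i = none := by
  unfold pvPartB; rw [if_neg hne, hs]

-- ===== VERDICT (by name: the statement is the Claim_ definition above) =====
set_option maxHeartbeats 2000000 in
theorem normalise_github_slug_spec : Claim_equal_normalise_github_slug := by
  intro git_url _
  unfold Spec_normalise_github_slug normalise_github_slug normalise_github_slug_alt
  set u := PySem.Str.strip git_url with hu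
  simp only [pvLoopA]
  by_cases h1 : PySem.Str.startswith u "https://github.com/" = true
  · -- https://github.com/ prefix
    obtain ⟨r, hr⟩ : "https://github.com/".toList <+: u.toList :=
      (PySem.Chars.startswith_iff _ _).mp (by rw [← PySem.Str.startswith_eq]; exact h1)
    have hfind : PySem.Str.find u "github.com" = (8 : Int) := by
      rw [PySem.Str.find_eq, ← hr]
      exact pv_find_at _ _ _ 8 (by decide) (by decide)
        (by intro j hj; interval_cases j <;> decide)
    rw [hfind]
    simp only [h1, if_true]
    have hhead : PySem.Str.slice u none (some 8) = "https://" := by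
      apply String.toList_inj.mp
      simp only [PySem.Str.toList_slice, PySem.Chars.slice_eq_listSlice]
      rw [PySem.List.slice_to _ (by norm_num), ← hr]
      rw [List.take_append_of_le_length (by decide)]
      decide
    have htailL : (PySem.Str.slice u (some ((8 : Int) + 10)) none).toList = '/' :: r := by
      simp only [PySem.Str.toList_slice, PySem.Chars.slice_eq_listSlice]
      rw [PySem.List.slice_from _ (by norm_num), ← hr]
      rw [List.drop_append_of_le_length (by decide)]
      rw [show "https://github.com/".toList.drop (((8 : Int) + 10).toNat) = ['/'] from by decide]
      rfl
    have hsw : PySem.Str.startswith (PySem.Str.slice u (some ((8 : Int) + 10)) none) "/" = true := by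
      rw [PySem.Str.startswith_eq, htailL]
      exact (PySem.Chars.startswith_iff _ _).mpr ⟨r, rfl⟩
    have hsel : pvSlugTail u 8 = some (PySem.Str.slice (PySem.Str.slice u (some ((8 : Int) + 10)) none) (some 1) none) := by
      simp only [pvSlugTail]
      rw [if_pos ⟨Or.inl hhead, hsw⟩]
    rw [pvPartB_some u 8 _ (by norm_num) hsel]
    have hslug : PySem.Str.slice (PySem.Str.slice u (some ((8 : Int) + 10)) none) (some 1) none
        = PySem.Str.slice u (some (PySem.Str.len "https://github.com/")) none := by
      apply String.toList_inj.mp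
      have l1 : (PySem.Str.slice (PySem.Str.slice u (some ((8 : Int) + 10)) none) (some 1) none).toList = r := by
        simp only [PySem.Str.toList_slice, PySem.Chars.slice_eq_listSlice]
        rw [PySem.List.slice_from _ (by norm_num), PySem.List.slice_from _ (by norm_num), ← hr]
        rw [List.drop_append_of_le_length (by decide)]
        rw [show "https://github.com/".toList.drop (((8 : Int) + 10).toNat) = ['/'] from by decide]
        rfl
      have l2 : (PySem.Str.slice u (some (PySem.Str.len "https://github.com/")) none).toList = r := by
        rw [show PySem.Str.len "https://github.com/" = (19 : Int) from by decide]
        simp only [PySem.Str.toList_slice, PySem.Chars.slice_eq_listSlice]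
        rw [PySem.List.slice_from _ (by norm_num), ← hr]
        rw [List.drop_append_of_le_length (by decide)]
        rw [show "https://github.com/".toList.drop (((19 : Int)).toNat) = ([] : List Char) from by decide]
        rfl
      exact l1.trans l2.symm
    rw [hslug]
    rfl
  · by_cases h2 : PySem.Str.startswith u "http://github.com/" = true
    · -- http://github.com/ prefix
      obtain ⟨r, hr⟩ : "http://github.com/".toList <+: u.toList :=
        (PySem.Chars.startswith_iff _ _).mp (by rw [← PySem.Str.startswith_eq]; exact h2)
      have hfind : PySem.Str.find u "github.com" = (7 : Int) := by
        rw [PySem.Str.find_eq, ← hr]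
        exact pv_find_at _ _ _ 7 (by decide) (by decide)
          (by intro j hj; interval_cases j <;> decide)
      rw [hfind]
      rw [Bool.not_eq_true] at h1
      simp only [h1, h2, Bool.false_eq_true, if_false, if_true]
      have hhead : PySem.Str.slice u none (some 7) = "http://" := by
        apply String.toList_inj.mp
        simp only [PySem.Str.toList_slice, PySem.Chars.slice_eq_listSlice]
        rw [PySem.List.slice_to _ (by norm_num), ← hr]
        rw [List.take_append_of_le_length (by decide)]
        decide
      have htailL : (PySem.Str.slice u (some ((7 : Int) + 10)) none).toList = '/' :: r := by
        simp only [PySem.Str.toList_slice, PySem.Chars.slice_eq_listSlice]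
        rw [PySem.List.slice_from _ (by norm_num), ← hr]
        rw [List.drop_append_of_le_length (by decide)]
        rw [show "http://github.com/".toList.drop (((7 : Int) + 10).toNat) = ['/'] from by decide]
        rfl
      have hsw : PySem.Str.startswith (PySem.Str.slice u (some ((7 : Int) + 10)) none) "/" = true := by
        rw [PySem.Str.startswith_eq, htailL]
        exact (PySem.Chars.startswith_iff _ _).mpr ⟨r, rfl⟩
      have hsel : pvSlugTail u 7 = some (PySem.Str.slice (PySem.Str.slice u (some ((7 : Int) + 10)) none) (some 1) none) := by
        simp only [pvSlugTail]
        rw [if_pos ⟨Or.inr hhead, hsw⟩]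
      rw [pvPartB_some u 7 _ (by norm_num) hsel]
      have hslug : PySem.Str.slice (PySem.Str.slice u (some ((7 : Int) + 10)) none) (some 1) none
          = PySem.Str.slice u (some (PySem.Str.len "http://github.com/")) none := by
        apply String.toList_inj.mp
        have l1 : (PySem.Str.slice (PySem.Str.slice u (some ((7 : Int) + 10)) none) (some 1) none).toList = r := by
          simp only [PySem.Str.toList_slice, PySem.Chars.slice_eq_listSlice]
          rw [PySem.List.slice_from _ (by norm_num), PySem.List.slice_from _ (by norm_num), ← hr]
          rw [List.drop_append_of_le_length (by decide)]
          rw [show "http://github.com/".toList.drop (((7 : Int) + 10).toNat) = ['/'] from by decide]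
          rfl
        have l2 : (PySem.Str.slice u (some (PySem.Str.len "http://github.com/")) none).toList = r := by
          rw [show PySem.Str.len "http://github.com/" = (18 : Int) from by decide]
          simp only [PySem.Str.toList_slice, PySem.Chars.slice_eq_listSlice]
          rw [PySem.List.slice_from _ (by norm_num), ← hr]
          rw [List.drop_append_of_le_length (by decide)]
          rw [show "http://github.com/".toList.drop (((18 : Int)).toNat) = ([] : List Char) from by decide]
          rfl
        exact l1.trans l2.symm
      rw [hslug]
      rfl
    · by_cases h3 : PySem.Str.startswith u "git@github.com:" = true
      · -- git@github.com: prefix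
        obtain ⟨r, hr⟩ : "git@github.com:".toList <+: u.toList :=
          (PySem.Chars.startswith_iff _ _).mp (by rw [← PySem.Str.startswith_eq]; exact h3)
        have hfind : PySem.Str.find u "github.com" = (4 : Int) := by
          rw [PySem.Str.find_eq, ← hr]
          exact pv_find_at _ _ _ 4 (by decide) (by decide)
            (by intro j hj; interval_cases j <;> decide)
        rw [hfind]
        rw [Bool.not_eq_true] at h1 h2
        simp only [h1, h2, h3, Bool.false_eq_true, if_false, if_true]
        have hhead : PySem.Str.slice u none (some 4) = "git@" := by
          apply String.toList_inj.mp
          simp only [PySem.Str.toList_slice, PySem.Chars.slice_eq_listSlice]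
          rw [PySem.List.slice_to _ (by norm_num), ← hr]
          rw [List.take_append_of_le_length (by decide)]
          decide
        have htailL : (PySem.Str.slice u (some ((4 : Int) + 10)) none).toList = ':' :: r := by
          simp only [PySem.Str.toList_slice, PySem.Chars.slice_eq_listSlice]
          rw [PySem.List.slice_from _ (by norm_num), ← hr]
          rw [List.drop_append_of_le_length (by decide)]
          rw [show "git@github.com:".toList.drop (((4 : Int) + 10).toNat) = [':'] from by decide]
          rfl
        have hsw : PySem.Str.startswith (PySem.Str.slice u (some ((4 : Int) + 10)) none) ":" = true := by
          rw [PySem.Str.startswith_eq, htailL]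
          exact (PySem.Chars.startswith_iff _ _).mpr ⟨r, rfl⟩
        have hsel : pvSlugTail u 4 = some (PySem.Str.slice (PySem.Str.slice u (some ((4 : Int) + 10)) none) (some 1) none) := by
          simp only [pvSlugTail]
          rw [if_neg (fun hcon => by
            rcases hcon.1 with h | h
            · exact absurd (hhead.symm.trans h) (by decide)
            · exact absurd (hhead.symm.trans h) (by decide))]
          rw [if_pos ⟨hhead, hsw⟩]
        rw [pvPartB_some u 4 _ (by norm_num) hsel]
        have hslug : PySem.Str.slice (PySem.Str.slice u (some ((4 : Int) + 10)) none) (some 1) none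
            = PySem.Str.slice u (some (PySem.Str.len "git@github.com:")) none := by
          apply String.toList_inj.mp
          have l1 : (PySem.Str.slice (PySem.Str.slice u (some ((4 : Int) + 10)) none) (some 1) none).toList = r := by
            simp only [PySem.Str.toList_slice, PySem.Chars.slice_eq_listSlice]
            rw [PySem.List.slice_from _ (by norm_num), PySem.List.slice_from _ (by norm_num), ← hr]
            rw [List.drop_append_of_le_length (by decide)]
            rw [show "git@github.com:".toList.drop (((4 : Int) + 10).toNat) = [':'] from by decide]
            rfl
          have l2 : (PySem.Str.slice u (some (PySem.Str.len "git@github.com:")) none).toList = r := by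
            rw [show PySem.Str.len "git@github.com:" = (15 : Int) from by decide]
            simp only [PySem.Str.toList_slice, PySem.Chars.slice_eq_listSlice]
            rw [PySem.List.slice_from _ (by norm_num), ← hr]
            rw [List.drop_append_of_le_length (by decide)]
            rw [show "git@github.com:".toList.drop (((15 : Int)).toNat) = ([] : List Char) from by decide]
            rfl
          exact l1.trans l2.symm
        rw [hslug]
        rfl
      · -- no prefix matches: A gives none; show B gives none too
        rw [Bool.not_eq_true] at h1 h2 h3
        simp only [h1, h2, h3, Bool.false_eq_true, if_false]
        by_cases hf : PySem.Str.find u "github.com" = -1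
        · rw [hf, pvPartB_neg_one]
        · have h0 : (0 : Int) ≤ PySem.Str.find u "github.com" := by
            have h' := PySem.Chars.neg_one_le_find u.toList "github.com".toList
            rw [← PySem.Str.find_eq] at h'
            omega
          have hlen : PySem.Str.find u "github.com" ≤ (u.toList.length : Int) := by
            have h' := PySem.Chars.find_le_length u.toList "github.com".toList
            rw [← PySem.Str.find_eq] at h'
            exact h'
          have h0' : (0 : Int) ≤ PySem.Chars.find u.toList "github.com".toList := by
            rw [← PySem.Str.find_eq]; exact h0
          obtain ⟨hocc, -⟩ := PySem.Chars.find_spec h0'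
          rw [← PySem.Str.find_eq] at hocc
          -- from a successful branch of B, reconstruct the corresponding full prefix of u
          have hrecon : ∀ (hd sepS p : String),
              (hd.toList ++ ("github.com".toList ++ sepS.toList) = p.toList) →
              PySem.Str.slice u none (some (PySem.Str.find u "github.com")) = hd →
              PySem.Str.startswith (PySem.Str.slice u (some (PySem.Str.find u "github.com" + 10)) none) sepS = true →
              PySem.Str.startswith u p = true := by
            intro hd sepS p hsplit hH hS
            have hHL : u.toList.take (PySem.Str.find u "github.com").toNat = hd.toList := by
              have h' := congrArg String.toList hH
              simp only [PySem.Str.toList_slice, PySem.Chars.slice_eq_listSlice] at h'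
              rw [PySem.List.slice_to _ h0] at h'
              exact h'
            have hSL : sepS.toList <+: u.toList.drop ((PySem.Str.find u "github.com").toNat + 10) := by
              rw [PySem.Str.startswith_eq] at hS
              have h' := (PySem.Chars.startswith_iff _ _).mp hS
              simp only [PySem.Str.toList_slice, PySem.Chars.slice_eq_listSlice] at h'
              rw [PySem.List.slice_from _ (by omega)] at h'
              rw [show (PySem.Str.find u "github.com" + 10).toNat = (PySem.Str.find u "github.com").toNat + 10 from by omega] at h'
              exact h'
            rw [PySem.Str.startswith_eq]
            apply (PySem.Chars.startswith_iff _ _).mpr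
            refine pv_recompose u.toList hd.toList "github.com".toList sepS.toList p.toList
              (PySem.Str.find u "github.com").toNat hHL ?_ ?_ (by rw [← List.append_assoc] at hsplit ⊢; exact hsplit)
            · exact hocc
            · have h10 : "github.com".toList.length = 10 := by decide
              rw [h10]
              exact hSL
          have hsel : pvSlugTail u (PySem.Str.find u "github.com") = none := by
            simp only [pvSlugTail]
            rw [if_neg (fun hcon => by
              rcases hcon.1 with h | h
              · exact absurd (hrecon "https://" "/" "https://github.com/" (by decide) h hcon.2) (by rw [h1]; exact Bool.false_ne_true)
              · exact absurd (hrecon "http://" "/" "http://github.com/" (by decide) h hcon.2) (by rw [h2]; exact Bool.false_ne_true))]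
            rw [if_neg (fun hcon =>
              absurd (hrecon "git@" ":" "git@github.com:" (by decide) hcon.1 hcon.2) (by rw [h3]; exact Bool.false_ne_true))]
          rw [pvPartB_none u _ hf hsel]
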